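-- pv_equiv track=rewrite | github.com/AryanK1511/LeetGod | 001-Arrays-and-Strings/004_more_practice.py | prefix_reverse
-- ===== SOURCE A (Python) =====
-- def prefix_reverse(word, ch):
--     word_list = list(word)
--     left = 0
--     right = 0
--     if ch not in word_list:
--         return word
--     else:
--         while word_list[right] != ch:
--             right += 1
--     while left < right:
--         word_list[left], word_list[right] = word_list[right], word_list[left]
--         left += 1
--         right -= 1
--     return "".join(word_list)
-- ===== SOURCE B (Python) =====
-- def prefix_reverse(word, ch):
--     # Single scan for the first character equal to ch (character equality, so a
--     # multi-character ch never matches); reverse the prefix with slicing.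
--     for j, c in enumerate(word):
--         if c == ch:
--             return word[:j + 1][::-1] + word[j + 1:]
--     return word
-- ===== Notes on version B (the rewrite author's own statement) =====
-- stated objective: idiomatic
-- what changed: Replaces A's separate membership test, index-advancing while loop and in-place two-pointer swap loop over a char list with a single enumerate scan for the first matching character and a closed-form slice expression word[:j+1][::-1] + word[j+1:].
import Mathlib
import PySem

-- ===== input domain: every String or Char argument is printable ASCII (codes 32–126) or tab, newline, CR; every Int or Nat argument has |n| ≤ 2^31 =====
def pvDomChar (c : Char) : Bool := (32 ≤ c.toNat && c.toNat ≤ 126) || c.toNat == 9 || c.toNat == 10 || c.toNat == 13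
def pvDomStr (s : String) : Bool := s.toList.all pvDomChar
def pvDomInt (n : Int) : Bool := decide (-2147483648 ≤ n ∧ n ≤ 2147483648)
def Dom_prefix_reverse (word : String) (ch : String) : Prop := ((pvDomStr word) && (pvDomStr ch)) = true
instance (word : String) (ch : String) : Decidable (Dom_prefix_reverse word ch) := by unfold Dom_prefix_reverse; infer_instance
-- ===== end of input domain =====

-- B replaces A's membership test + index-advancing while loop + in-place two-pointer
-- swap with one scan for the first matching character and a slice expression (idiomatic).

-- ===== PORT A =====
-- the 'while word_list[right] != ch: right += 1' loop: advances over the list, counting the index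
def pvScanA : List Char → String → Nat → Nat
  | [], _, r => r
  | c :: rest, ch, r => if String.ofList [c] ≠ ch then pvScanA rest ch (r + 1) else r

-- the two-pointer swap loop 'while left < right: swap; left += 1; right -= 1'
def pvSwapA (l : List Char) (left right : Nat) : List Char :=
  if left < right then
    pvSwapA ((l.set left (l.getD right ' ')).set right (l.getD left ' ')) (left + 1) (right - 1)
  else l
termination_by right - left
decreasing_by omega

def prefix_reverse (word : String) (ch : String) : String :=
  let wl := word.toList
  -- 'ch not in word_list': membership of the string ch among the one-char strings of the list
  if ¬ (wl.map (fun c => String.ofList [c])).contains ch then word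
  else String.ofList (pvSwapA wl 0 (pvScanA wl ch 0))

-- ===== PORT B =====
-- 'for j, c in enumerate(word): if c == ch: return …' — scan with an index counter
def pvScanB : List Char → String → Nat → Option Nat
  | [], _, _ => none
  | c :: rest, ch, j => if String.ofList [c] = ch then some j else pvScanB rest ch (j + 1)

def prefix_reverse_alt (word : String) (ch : String) : String :=
  match pvScanB word.toList ch 0 with
  | none => word
  | some j => String.ofList ((word.toList.take (j + 1)).reverse ++ word.toList.drop (j + 1))

-- ===== PRECONDITION & SPEC =====
def Spec_prefix_reverse (word : String) (ch : String) (out : String) : Prop := out = prefix_reverse_alt word ch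
instance (word : String) (ch : String) (out : String) : Decidable (Spec_prefix_reverse word ch out) := by unfold Spec_prefix_reverse; infer_instance

-- ===== CLAIM (what is proved, stated in full; the proofs are below) =====
def Claim_equal_prefix_reverse : Prop := ∀ (word : String) (ch : String), Dom_prefix_reverse word ch → Spec_prefix_reverse word ch (prefix_reverse word ch)

-- ===== LEMMAS AND PROOFS =====

theorem pvScanB_none (l : List Char) (ch : String) (j : Nat)
    (h : ∀ c ∈ l, String.ofList [c] ≠ ch) : pvScanB l ch j = none := by
  induction l generalizing j with
  | nil => rfl
  | cons c rest ih =>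
    simp only [pvScanB]
    rw [if_neg (h c (List.mem_cons_self))]
    exact ih _ (fun c hc => h c (List.mem_cons_of_mem _ hc))

theorem pvScanB_eq_scanA (l : List Char) (ch : String) (j : Nat)
    (h : ∃ c ∈ l, String.ofList [c] = ch) : pvScanB l ch j = some (pvScanA l ch j) := by
  induction l generalizing j with
  | nil => simp at h
  | cons c rest ih =>
    simp only [pvScanB, pvScanA]
    by_cases hc : String.ofList [c] = ch
    · simp [hc]
    · rw [if_pos hc, if_neg hc]
      apply ih
      rcases h with ⟨d, hd, hde⟩
      rcases List.mem_cons.mp hd with h1 | h2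
      · exact absurd (h1 ▸ hde) hc
      · exact ⟨d, h2, hde⟩

theorem pvScanA_bounds (l : List Char) (ch : String) (j : Nat)
    (h : ∃ c ∈ l, String.ofList [c] = ch) :
    j ≤ pvScanA l ch j ∧ pvScanA l ch j - j < l.length := by
  induction l generalizing j with
  | nil => simp at h
  | cons c rest ih =>
    simp only [pvScanA]
    by_cases hc : String.ofList [c] = ch
    · simp [hc]
    · rw [if_pos hc]
      have h' : ∃ d ∈ rest, String.ofList [d] = ch := by
        rcases h with ⟨d, hd, hde⟩
        rcases List.mem_cons.mp hd with h1 | h2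
        · exact absurd (h1 ▸ hde) hc
        · exact ⟨d, h2, hde⟩
      have := ih (j + 1) h'
      constructor <;> [omega; (simp only [List.length_cons]; omega)]

theorem pvSwapA_length (l : List Char) (left right : Nat) :
    (pvSwapA l left right).length = l.length := by
  rw [pvSwapA]
  split
  · rw [pvSwapA_length]; simp
  · rfl
termination_by right - left
decreasing_by omega

theorem pvSwapA_getD (n : Nat) : ∀ (l : List Char) (left right : Nat), right - left = n →
    right < l.length → ∀ k : Nat,
    (pvSwapA l left right).getD k ' ' =
      if left ≤ k ∧ k ≤ right then l.getD (left + right - k) ' ' else l.getD k ' ' := by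
  induction n using Nat.strong_induction_on with
  | _ n ih =>
    intro l left right hn hr k
    rw [pvSwapA]
    by_cases hlr : left < right
    · rw [if_pos hlr]
      set l' := (l.set left (l.getD right ' ')).set right (l.getD left ' ') with hl'
      have hlen : l'.length = l.length := by simp [hl']
      have hget : ∀ m : Nat, l'.getD m ' ' =
          if m = right then l.getD left ' ' else if m = left then l.getD right ' '
          else l.getD m ' ' := by
        intro m
        by_cases hm : m < l.length
        · simp only [hl', List.getD_eq_getElem?_getD]
          rcases eq_or_ne m right with rfl | h1
          · simp [hm]
          · rcases eq_or_ne m left with rfl | h2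
            · simp [hm, h1, Ne.symm h1]
            · simp [h1, h2, Ne.symm h1, Ne.symm h2]
        · have h1 : m ≠ right := by omega
          have h2 : m ≠ left := by omega
          have hlm : l.length ≤ m := by omega
          rw [List.getD_eq_default _ _ (show l'.length ≤ m by rw [hlen]; exact hlm),
            List.getD_eq_default _ _ hlm, if_neg h1, if_neg h2]
      have hrec := ih (right - 1 - (left + 1)) (by omega) l' (left + 1) (right - 1) rfl
        (by omega) k
      rw [hrec]
      by_cases hk1 : left + 1 ≤ k ∧ k ≤ right - 1
      · rw [if_pos hk1, if_pos (by omega), hget]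
        have h1 : left + 1 + (right - 1) - k ≠ right := by omega
        have h2 : left + 1 + (right - 1) - k ≠ left := by omega
        rw [if_neg h1, if_neg h2]
        congr 1; omega
      · rw [if_neg hk1, hget]
        rcases eq_or_ne k right with rfl | hkr
        · rw [if_pos rfl, if_pos (by omega)]; congr 1; omega
        · rw [if_neg hkr]
          rcases eq_or_ne k left with rfl | hkl
          · rw [if_pos rfl, if_pos (by omega)]; congr 1; omega
          · rw [if_neg hkl, if_neg (by omega)]
    · rw [if_neg hlr]
      by_cases hk : left ≤ k ∧ k ≤ right
      · have : k = left ∧ k = right := by omega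
        rw [if_pos hk]; congr 1; omega
      · rw [if_neg hk]

-- B's slice expression, characterised elementwise
theorem sliceB_getD (l : List Char) (i : Nat) (hi : i < l.length) (k : Nat) :
    ((l.take (i + 1)).reverse ++ l.drop (i + 1)).getD k ' ' =
      if 0 ≤ k ∧ k ≤ i then l.getD (0 + i - k) ' ' else l.getD k ' ' := by
  have htl : (l.take (i + 1)).length = i + 1 := by simp; omega
  by_cases hk : k ≤ i
  · rw [if_pos ⟨Nat.zero_le _, hk⟩]
    have hk1 : k < (l.take (i + 1)).reverse.length := by simp [htl]; omega
    rw [List.getD_append _ _ _ _ hk1]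
    have hik : 0 + i - k < l.length := by omega
    rw [List.getD_eq_getElem _ _ hik, List.getD_eq_getElem _ _ (by simpa [htl] using hk1)]
    rw [List.getElem_reverse, List.getElem_take]
    congr 1; simp [htl]; try omega
  · rw [if_neg (by omega)]
    have hk2 : (l.take (i + 1)).reverse.length ≤ k := by simp [htl]; omega
    rw [List.getD_append_right _ _ _ _ hk2]
    by_cases hkl : k < l.length
    · rw [List.getD_eq_getElem _ _ (by simp [htl]; omega),
        List.getD_eq_getElem _ _ hkl, List.getElem_drop]
      congr 1; simp [htl]; omega
    · rw [List.getD_eq_default _ _ (by simp [htl]; omega), List.getD_eq_default _ _ (by omega)]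

theorem contains_iff (l : List Char) (ch : String) :
    (l.map (fun c => String.ofList [c])).contains ch = true ↔ ∃ c ∈ l, String.ofList [c] = ch := by
  simp [eq_comm]

-- ===== VERDICT (by name: the statement is the Claim_ definition above) =====
theorem prefix_reverse_spec : Claim_equal_prefix_reverse := by
  intro word ch _
  unfold Spec_prefix_reverse prefix_reverse prefix_reverse_alt
  set wl := word.toList with hwl
  by_cases hmem : (wl.map (fun c => String.ofList [c])).contains ch
  · have hex : ∃ c ∈ wl, String.ofList [c] = ch := (contains_iff wl ch).mp hmem
    rw [if_neg (not_not.mpr hmem), pvScanB_eq_scanA wl ch 0 hex]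
    set i := pvScanA wl ch 0 with hi
    have hb := pvScanA_bounds wl ch 0 hex
    have hilt : i < wl.length := by omega
    simp only
    congr 1
    have hlen : (pvSwapA wl 0 i).length = ((wl.take (i + 1)).reverse ++ wl.drop (i + 1)).length := by
      rw [pvSwapA_length]; simp; omega
    apply List.ext_getElem hlen
    intro k hk1 hk2
    rw [← List.getD_eq_getElem _ ' ' hk1, ← List.getD_eq_getElem _ ' ' hk2]
    rw [pvSwapA_getD (i - 0) wl 0 i rfl hilt k, sliceB_getD wl i hilt k]
  · rw [if_pos hmem]
    have hnone : ∀ c ∈ wl, String.ofList [c] ≠ ch := by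
      intro c hc he
      exact hmem ((contains_iff wl ch).mpr ⟨c, hc, he⟩)
    rw [pvScanB_none wl ch 0 hnone]
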